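-- pv_equiv track=rewrite | github.com/almirgon/LabP1 | Unidade-6/prevogais.py | pre_vogais
-- ===== SOURCE A (Python) =====
-- def pre_vogais(palavra):
-- 	palavra= palavra.lower()
-- 	lista_vogais = ['a', 'e', 'i', 'o', 'u']
-- 	l=[]
-- 	for i in range(1, len(palavra)):
-- 		for vogais in lista_vogais:
-- 			if palavra[i]==vogais:
-- 				if len(l)==0:
-- 					l.append(palavra[i-1])
-- 				else:
-- 					contador=0
-- 					for letras in l:
-- 						if letras != palavra[i-1]:
-- 							contador+=1
-- 						if contador==len(l):
-- 							l.append(palavra[i-1])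
-- 	return l
-- ===== SOURCE B (Python) =====
-- def pre_vogais(palavra):
--     w = palavra.lower()
--     vogais = {'a', 'e', 'i', 'o', 'u'}
--     cand = [w[i - 1] for i in range(1, len(w)) if w[i] in vogais]
--     return list(dict.fromkeys(cand))
-- ===== Notes on version B (the rewrite author's own statement) =====
-- stated objective: faster
-- what changed: A's fused loop with an inline per-vowel comparison loop and a quirky counter-based dedup scan that appends mid-iteration is replaced by one comprehension collecting every char preceding a vowel (hash-set vowel test) plus a separate order-preserving dedup via dict.fromkeys.
import Mathlib
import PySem

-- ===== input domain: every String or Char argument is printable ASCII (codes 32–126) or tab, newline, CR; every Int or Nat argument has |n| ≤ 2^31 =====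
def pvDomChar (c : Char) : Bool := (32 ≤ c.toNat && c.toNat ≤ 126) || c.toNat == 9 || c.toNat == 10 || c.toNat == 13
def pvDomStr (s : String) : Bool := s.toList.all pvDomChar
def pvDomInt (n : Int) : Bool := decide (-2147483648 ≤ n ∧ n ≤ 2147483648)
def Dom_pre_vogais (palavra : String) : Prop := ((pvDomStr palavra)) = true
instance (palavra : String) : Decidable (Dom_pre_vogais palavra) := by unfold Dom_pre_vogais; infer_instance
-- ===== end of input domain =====

-- B replaces A's fused collect-and-dedup loop (inline counter-based membership scan that appends
-- mid-iteration) by one comprehension collecting the chars preceding vowels plus a separate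
-- order-preserving dedup pass (dict.fromkeys); return values proved equal on all inputs.

-- ===== PORT A =====
-- the inner 'for letras in l' loop of A: Python iterates by index over the list l, which may
-- grow by one element mid-iteration; ported index-by-index with fuel (fuel only makes the
-- same computation total; l.length + 2 steps always suffice, proved below)
def pvInnerA (x : String) (l : List String) (j contador : Nat) (fuel : Nat) : List String :=
  match fuel with
  | 0 => l
  | fuel + 1 =>
    if h : j < l.length then
      let letras := l[j]
      let contador' := if letras ≠ x then contador + 1 else contador
      let l' := if contador' = l.length then l ++ [x] else l
      pvInnerA x l' (j + 1) contador' fuel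
    else l

def pre_vogais (palavra : String) : List String :=
  let w := (PySem.Str.lower palavra).toList
  let lista_vogais : List Char := ['a', 'e', 'i', 'o', 'u']
  (PySem.List.pyRange 1 (w.length : Int) 1).foldl (fun l i =>
    lista_vogais.foldl (fun l vogais =>
      if PySem.List.pyGetD w i ' ' = vogais then
        if l.length = 0 then l ++ [String.mk [PySem.List.pyGetD w (i - 1) ' ']]
        else pvInnerA (String.mk [PySem.List.pyGetD w (i - 1) ' ']) l 0 0 (l.length + 2)
      else l) l) []

-- ===== PORT B =====
def pre_vogais_alt (palavra : String) : List String :=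
  let w := (PySem.Str.lower palavra).toList
  let vogais : List Char := ['a', 'e', 'i', 'o', 'u']
  let cand : List String :=
    ((PySem.List.pyRange 1 (w.length : Int) 1).filter
        (fun i => PySem.List.pyGetD w i ' ' ∈ vogais)).map
      (fun i => String.mk [PySem.List.pyGetD w (i - 1) ' '])
  PySem.List.dedup cand

-- ===== PRECONDITION & SPEC =====
def Spec_pre_vogais (palavra : String) (out : List String) : Prop := out = pre_vogais_alt palavra
instance (palavra : String) (out : List String) : Decidable (Spec_pre_vogais palavra out) := by unfold Spec_pre_vogais; infer_instance

-- ===== CLAIM (what is proved, stated in full; the proofs are below) =====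
def Claim_equal_pre_vogais : Prop := ∀ (palavra : String), Dom_pre_vogais palavra → Spec_pre_vogais palavra (pre_vogais palavra)

-- ===== LEMMAS AND PROOFS =====

-- countP of a prefix one longer
lemma pv_countP_take_succ (l : List String) (x : String) (j : Nat) (h : j < l.length) :
    (l.take (j + 1)).countP (fun a => a ≠ x) =
      (l.take j).countP (fun a => a ≠ x) + (if l[j] ≠ x then 1 else 0) := by
  rw [List.take_succ, List.countP_append, List.getElem?_eq_getElem h]
  by_cases hx : l[j] = x <;> simp [hx]

lemma pv_countP_lt (l : List String) (x : String) (hx : x ∈ l) :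
    l.countP (fun a => a ≠ x) < l.length := by
  rcases List.append_of_mem hx with ⟨s, t, rfl⟩
  simp [List.countP_append]
  have h1 := List.countP_le_length (p := fun a => !decide (a = x)) (l := s)
  have h2 := List.countP_le_length (p := fun a => !decide (a = x)) (l := t)
  omega

-- scan phase when x occurs in l: the append never fires
lemma pvInnerA_mem (fuel : Nat) : ∀ (x : String) (l : List String) (j : Nat),
    x ∈ l → l.length ≤ j + fuel →
    pvInnerA x l j ((l.take j).countP (fun a => a ≠ x)) fuel = l := by
  induction fuel with
  | zero => intro x l j _ hlen; rfl
  | succ fuel ih =>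
    intro x l j hx hlen
    unfold pvInnerA
    by_cases h : j < l.length
    · simp only [h, dif_pos]
      have hc : (if l[j] ≠ x then (l.take j).countP (fun a => a ≠ x) + 1
          else (l.take j).countP (fun a => a ≠ x)) = (l.take (j+1)).countP (fun a => a ≠ x) := by
        rw [pv_countP_take_succ l x j h]
        split_ifs <;> omega
      rw [hc]
      have hlt : (l.take (j+1)).countP (fun a => a ≠ x) < l.length := by
        calc (l.take (j+1)).countP (fun a => a ≠ x)
            ≤ l.countP (fun a => a ≠ x) := List.Sublist.countP_le (List.take_sublist _ _)
          _ < l.length := pv_countP_lt l x hx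
      rw [if_neg (by omega)]
      exact ih x l (j+1) hx (by omega)
    · simp [h]

-- after the append: one more iteration reads the freshly appended x, then the loop ends
lemma pvInnerA_post (fuel : Nat) (x : String) (l : List String) (h2 : 2 ≤ fuel) :
    pvInnerA x (l ++ [x]) l.length l.length fuel = l ++ [x] := by
  obtain ⟨f, rfl⟩ : ∃ f, fuel = f + 2 := ⟨fuel - 2, by omega⟩
  unfold pvInnerA
  rw [dif_pos (by simp)]
  simp only [List.getElem_append_right (le_refl l.length)]
  simp [pvInnerA]

-- scan phase when x is absent: contador tracks j and the append fires at the last element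
lemma pvInnerA_not_mem (n : Nat) : ∀ (x : String) (l : List String) (j fuel : Nat),
    x ∉ l → l.length = j + n → 1 ≤ n → n + 2 ≤ fuel →
    pvInnerA x l j j fuel = l ++ [x] := by
  induction n with
  | zero => intro _ _ _ _ _ _ h _; omega
  | succ n ih =>
    intro x l j fuel hx hlen _ hfuel
    obtain ⟨f, rfl⟩ : ∃ f, fuel = f + 1 := ⟨fuel - 1, by omega⟩
    unfold pvInnerA
    have hj : j < l.length := by omega
    simp only [hj, dif_pos]
    have hne : l[j] ≠ x := fun h => hx (h ▸ List.getElem_mem hj)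
    rw [if_pos hne]
    by_cases hn : n = 0
    · subst hn
      have hle : j + 1 = l.length := by omega
      rw [if_pos hle, hle]
      exact pvInnerA_post f x l (by omega)
    · rw [if_neg (by omega)]
      exact ih x l (j+1) f hx (by omega) (by omega) (by omega)

-- the inner loop is exactly Python's "append x if not already present" on a nonempty l
lemma pvInnerA_spec (x : String) (l : List String) (hl : l ≠ []) :
    pvInnerA x l 0 0 (l.length + 2) = if x ∈ l then l else l ++ [x] := by
  by_cases hx : x ∈ l
  · rw [if_pos hx]
    have := pvInnerA_mem (l.length + 2) x l 0 hx (by omega)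
    simpa using this
  · rw [if_neg hx]
    exact pvInnerA_not_mem l.length x l 0 (l.length + 2) hx (by omega)
      (by rcases l with _ | _ <;> simp_all) (by omega)

-- A's step (vowel scan + conditional insert) equals "if vowel then Set.add"
lemma pv_step_eq (c : Char) (p : String) (l : List String) :
    (['a','e','i','o','u'] : List Char).foldl (fun l vogais =>
      if c = vogais then
        if l.length = 0 then l ++ [p] else pvInnerA p l 0 0 (l.length + 2)
      else l) l =
    if c ∈ (['a','e','i','o','u'] : List Char) then PySem.Set.add l p else l := by
  have hadd : ∀ (l : List String),
      (if l.length = 0 then l ++ [p] else pvInnerA p l 0 0 (l.length + 2))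
        = PySem.Set.add l p := by
    intro l
    rcases l with _ | ⟨a, t⟩
    · simp [PySem.Set.add, PySem.Set.contains]
    · rw [if_neg (by simp), pvInnerA_spec p (a :: t) (by simp)]
      simp [PySem.Set.add, PySem.Set.contains]
  simp only [List.foldl]
  by_cases h1 : c = 'a' <;> by_cases h2 : c = 'e' <;> by_cases h3 : c = 'i' <;>
    by_cases h4 : c = 'o' <;> by_cases h5 : c = 'u' <;>
    simp_all

-- ===== VERDICT (by name: the statement is the Claim_ definition above) =====
theorem pre_vogais_spec : Claim_equal_pre_vogais := by
  intro palavra _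
  unfold Spec_pre_vogais pre_vogais pre_vogais_alt
  simp only []
  set w := (PySem.Str.lower palavra).toList with hw
  refine Eq.trans (PySem.List.foldl_congr_mem _ _ _ _ (fun l i _ =>
    pv_step_eq (PySem.List.pyGetD w i ' ') (String.mk [PySem.List.pyGetD w (i - 1) ' ']) l)) ?_
  rw [PySem.List.foldl_ite_eq_foldl_filter, PySem.List.dedup_eq_ofList,
    PySem.Set.ofList_eq_foldl, List.foldl_map]
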